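-- pv_equiv track=rewrite | github.com/usiohc/BOJ_study-baekjunhub- | 프로그래머스/unrated/169198. 당구 연습/당구 연습.py | solution
-- ===== SOURCE A (Python) =====
-- def solution(m, n, sx, sy, balls):
--     answer = []
--
--     for bx, by in balls:
--         xys = []
--         if sy == by:
--             if sx>bx:
--                 xys.append((2 * m - sx - bx) **2)
--             else:
--                 xys.append((sx + bx)**2)
--
--             xys.append((bx - sx) **2 + 4 * sy ** 2)
--             xys.append((bx - sx) **2 + 4 * (n - sy)**2)
--         elif sx == bx:
--             if sy>by:
--                 xys.append((2 * n - sy - by) **2)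
--             else:
--                 xys.append((sy + by)**2)
--
--             xys.append((by - sy) **2 + 4 * sx ** 2)
--             xys.append((by - sy) **2 + 4 * (m - sx)**2)
--         else:
--             xys.append((bx - sx)**2 + (by + sy)**2)
--             xys.append((bx + sx)**2 + (by - sy)**2)
--             xys.append((by - sy)**2 + (2 * m - sx - bx)**2)
--             xys.append((bx - sx)**2 + (2 * n - sy - by)**2)
--
--         answer.append(min(xys))
--     return answer
-- ===== SOURCE B (Python) =====
-- def solution(m, n, sx, sy, balls):
--     # Column-major wall-image method: one pass per wall over ALL balls builds a
--     # column of squared distances to that wall's reflected start image (None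
--     # where that reflection is blocked by the ball's own line), then a final
--     # zip pass takes the per-ball minimum across the four columns.
--     def column(ix, iy, blocked):
--         return [None if blocked(bx, by) else (ix - bx) ** 2 + (iy - by) ** 2
--                 for bx, by in balls]
--
--     left   = column(-sx,        sy,         lambda bx, by: by == sy and bx < sx)
--     right  = column(2 * m - sx, sy,         lambda bx, by: by == sy and bx >= sx)
--     bottom = column(sx,         -sy,        lambda bx, by: by != sy and bx == sx and by < sy)
--     top    = column(sx,         2 * n - sy, lambda bx, by: by != sy and bx == sx and by >= sy)
--
--     answer = []
--     for l, r, b, t in zip(left, right, bottom, top):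
--         answer.append(min(v for v in (l, r, b, t) if v is not None))
--     return answer
-- ===== Notes on version B (the rewrite author's own statement) =====
-- stated objective: alternative
-- what changed: B is column-major: instead of A's per-ball branch into three hand-tailored candidate lists, B makes one pass over the whole ball list per wall image, building four distance columns (None marking the blocked reflection), then a final zip pass takes the per-ball minimum across the columns.
import Mathlib
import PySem

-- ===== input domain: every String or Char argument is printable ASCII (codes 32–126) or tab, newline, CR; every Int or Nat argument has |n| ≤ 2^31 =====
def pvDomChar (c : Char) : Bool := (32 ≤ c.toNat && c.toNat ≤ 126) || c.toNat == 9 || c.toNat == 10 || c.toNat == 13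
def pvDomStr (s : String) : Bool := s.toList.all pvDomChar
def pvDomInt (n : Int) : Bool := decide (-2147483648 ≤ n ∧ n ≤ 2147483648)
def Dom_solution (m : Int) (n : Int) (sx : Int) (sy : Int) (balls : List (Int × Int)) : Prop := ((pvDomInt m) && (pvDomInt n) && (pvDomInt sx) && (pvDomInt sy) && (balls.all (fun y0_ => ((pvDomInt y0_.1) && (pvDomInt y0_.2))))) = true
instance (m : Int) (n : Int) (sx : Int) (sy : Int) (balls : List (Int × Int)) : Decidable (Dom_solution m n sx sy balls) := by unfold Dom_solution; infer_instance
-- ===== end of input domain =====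

-- B is column-major: one pass per wall image over all balls builds a column of
-- distances (None at the blocked reflection), then a zip pass takes per-ball mins
-- (objective: alternative — a transposed, staged-pass decomposition, same cost).

-- ===== PORT A =====
-- literal transliteration of A; min(xys) on the (always nonempty) list xys is
-- ported as PySem.List.min? with getD 0 (the default is never used).
def solution (m : Int) (n : Int) (sx : Int) (sy : Int) (balls : List (Int × Int)) : List Int :=
  balls.foldl (fun answer b =>
    let bx := b.1
    let by_ := b.2
    let xys : List Int :=
      if sy = by_ then
        (if sx > bx then [(2*m - sx - bx)^2] else [(sx + bx)^2])
          ++ [(bx - sx)^2 + 4*sy^2, (bx - sx)^2 + 4*(n - sy)^2]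
      else if sx = bx then
        (if sy > by_ then [(2*n - sy - by_)^2] else [(sy + by_)^2])
          ++ [(by_ - sy)^2 + 4*sx^2, (by_ - sy)^2 + 4*(m - sx)^2]
      else
        [(bx - sx)^2 + (by_ + sy)^2, (bx + sx)^2 + (by_ - sy)^2,
         (by_ - sy)^2 + (2*m - sx - bx)^2, (bx - sx)^2 + (2*n - sy - by_)^2]
    answer ++ [(PySem.List.min? xys (fun x => x)).getD 0]) []

-- ===== PORT B =====
-- Source B's `column`: one pass over all balls for a single wall image (ix,iy)
def pvColumn (balls : List (Int × Int)) (ix iy : Int) (blocked : Int → Int → Bool) : List (Option Int) :=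
  balls.map (fun b => if blocked b.1 b.2 then none else some ((ix - b.1)^2 + (iy - b.2)^2))

def solution_alt (m : Int) (n : Int) (sx : Int) (sy : Int) (balls : List (Int × Int)) : List Int :=
  let left   := pvColumn balls (-sx) sy (fun bx by_ => by_ == sy && decide (bx < sx))
  let right  := pvColumn balls (2*m - sx) sy (fun bx by_ => by_ == sy && decide (sx ≤ bx))
  let bottom := pvColumn balls sx (-sy) (fun bx by_ => by_ != sy && bx == sx && decide (by_ < sy))
  let top    := pvColumn balls sx (2*n - sy) (fun bx by_ => by_ != sy && bx == sx && decide (sy ≤ by_))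
  (((left.zip right).zip bottom).zip top).foldl (fun answer lrbt =>
    answer ++ [(PySem.List.min? ([lrbt.1.1.1, lrbt.1.1.2, lrbt.1.2, lrbt.2].filterMap id)
                 (fun x => x)).getD 0]) []

-- ===== PRECONDITION & SPEC =====
def Spec_solution (m : Int) (n : Int) (sx : Int) (sy : Int) (balls : List (Int × Int)) (out : List Int) : Prop := out = solution_alt m n sx sy balls
instance (m : Int) (n : Int) (sx : Int) (sy : Int) (balls : List (Int × Int)) (out : List Int) : Decidable (Spec_solution m n sx sy balls out) := by unfold Spec_solution; infer_instance

-- ===== CLAIM =====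
def Claim_equal_solution : Prop := ∀ (m : Int) (n : Int) (sx : Int) (sy : Int) (balls : List (Int × Int)), Dom_solution m n sx sy balls → Spec_solution m n sx sy balls (solution m n sx sy balls)

-- ===== LEMMAS AND PROOFS =====
theorem perBall_eq (m n sx sy bx by_ : Int) :
    (PySem.List.min?
      (if sy = by_ then
        (if sx > bx then [(2*m - sx - bx)^2] else [(sx + bx)^2])
          ++ [(bx - sx)^2 + 4*sy^2, (bx - sx)^2 + 4*(n - sy)^2]
      else if sx = bx then
        (if sy > by_ then [(2*n - sy - by_)^2] else [(sy + by_)^2])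
          ++ [(by_ - sy)^2 + 4*sx^2, (by_ - sy)^2 + 4*(m - sx)^2]
      else
        [(bx - sx)^2 + (by_ + sy)^2, (bx + sx)^2 + (by_ - sy)^2,
         (by_ - sy)^2 + (2*m - sx - bx)^2, (bx - sx)^2 + (2*n - sy - by_)^2])
      (fun x => x)).getD 0 =
    (PySem.List.min?
      (([if by_ == sy && decide (bx < sx) then none else some ((-sx - bx)^2 + (sy - by_)^2),
         if by_ == sy && decide (sx ≤ bx) then none else some ((2*m - sx - bx)^2 + (sy - by_)^2),
         if by_ != sy && bx == sx && decide (by_ < sy) then none else some ((sx - bx)^2 + (-sy - by_)^2),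
         if by_ != sy && bx == sx && decide (sy ≤ by_) then none else some ((sx - bx)^2 + (2*n - sy - by_)^2)].filterMap id))
      (fun x => x)).getD 0 := by
  rcases eq_or_ne sy by_ with h1 | h1
  · subst h1
    rcases lt_or_ge bx sx with h3 | h3
    · simp [h3, not_le.mpr h3, List.filterMap, PySem.List.min?_id_cons, List.foldl]
      ring_nf
    · simp [not_lt.mpr h3, h3, List.filterMap, PySem.List.min?_id_cons, List.foldl]
      ring_nf
  · rcases eq_or_ne sx bx with h2 | h2
    · subst h2
      rcases lt_or_ge by_ sy with h4 | h4
      · simp [h1, Ne.symm h1, h4, not_le.mpr h4, List.filterMap,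
              PySem.List.min?_id_cons, List.foldl]
        ring_nf
        ac_rfl
      · simp [h1, Ne.symm h1, not_lt.mpr h4, h4, List.filterMap,
              PySem.List.min?_id_cons, List.foldl]
        ring_nf
        ac_rfl
    · simp [h1, Ne.symm h1, h2, Ne.symm h2, List.filterMap,
            PySem.List.min?_id_cons, List.foldl]
      simp only [← min_add_add_right, ← min_add_add_left]
      ring_nf
      ac_rfl

-- ===== VERDICT =====
theorem solution_spec : Claim_equal_solution := by
  intro m n sx sy balls _
  unfold Spec_solution solution solution_alt pvColumn
  dsimp only
  rw [List.zip_map', List.zip_map', List.zip_map',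
      PySem.List.foldl_append_singleton_eq_map, PySem.List.foldl_append_singleton_eq_map]
  simp only [List.map_map, List.nil_append]
  exact List.map_congr_left (fun b _ => perBall_eq m n sx sy b.1 b.2)
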